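-- pv_equiv track=rewrite | github.com/Lasse-mohr/fertility-prediction-challenge | data_processing/encoding/categorical.py | one_word_match
-- ===== SOURCE A (Python) =====
-- def one_word_match(labels):
--     """ Checks whether all labels have a word in common"""
--     for label in labels:
--         for word in label.split():
--             if all([word in l.split() for l in labels if l != label]):
--                 break
--         else:
--             return False
--     return True
-- ===== SOURCE B (Python) =====
-- def one_word_match(labels):
--     """ Checks whether all labels have a word in common"""
--     if not labels:
--         return True
--     common = set(labels[0].split())
--     for l in labels[1:]:
--         common &= set(l.split())
--     return bool(common)
-- ===== Notes on version B (the rewrite author's own statement) =====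
-- stated objective: faster
-- what changed: Replaces the nested per-label/per-word scan over all other labels by a single pass that intersects per-label word sets and tests the intersection for non-emptiness (empty list stays True).
import Mathlib
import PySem

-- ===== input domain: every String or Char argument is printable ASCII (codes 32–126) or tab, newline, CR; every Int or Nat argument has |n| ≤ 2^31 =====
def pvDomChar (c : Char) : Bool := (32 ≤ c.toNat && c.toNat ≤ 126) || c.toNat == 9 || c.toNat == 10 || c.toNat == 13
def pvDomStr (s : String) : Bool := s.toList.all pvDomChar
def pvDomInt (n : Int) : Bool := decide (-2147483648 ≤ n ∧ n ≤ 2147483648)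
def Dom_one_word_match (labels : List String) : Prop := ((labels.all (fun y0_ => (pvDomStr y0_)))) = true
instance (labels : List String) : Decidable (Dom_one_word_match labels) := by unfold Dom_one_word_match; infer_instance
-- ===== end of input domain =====

-- B replaces the nested per-label scans by one pass intersecting per-label word sets (faster, asymptotic).
-- ===== PORT A =====
def one_word_match (labels : List String) : Bool :=
  labels.all (fun label =>
    (PySem.Str.split₀ label).any (fun word =>
      (labels.filter (fun l => l != label)).all (fun l =>
        (PySem.Str.split₀ l).contains word)))

-- ===== PORT B =====
def one_word_match_alt (labels : List String) : Bool :=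
  match labels with
  | [] => true
  | l0 :: rest =>
    let common := rest.foldl
      (fun acc l => PySem.Set.inter acc (PySem.Set.ofList (PySem.Str.split₀ l)))
      (PySem.Set.ofList (PySem.Str.split₀ l0))
    !common.isEmpty

-- ===== PRECONDITION & SPEC =====
def Spec_one_word_match (labels : List String) (out : Bool) : Prop := out = one_word_match_alt labels
instance (labels : List String) (out : Bool) : Decidable (Spec_one_word_match labels out) := by unfold Spec_one_word_match; infer_instance

-- ===== CLAIM (what is proved, stated in full; the proofs are below) =====
def Claim_equal_one_word_match : Prop := ∀ (labels : List String), Dom_one_word_match labels → Spec_one_word_match labels (one_word_match labels)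

-- ===== LEMMAS AND PROOFS =====
-- membership in the running intersection of B's fold
lemma mem_foldl_inter (rest : List String) (acc : PySem.Set String) (w : String) :
    w ∈ rest.foldl
        (fun acc l => PySem.Set.inter acc (PySem.Set.ofList (PySem.Str.split₀ l))) acc
      ↔ w ∈ acc ∧ ∀ l ∈ rest, w ∈ PySem.Str.split₀ l := by
  induction rest generalizing acc with
  | nil => simp
  | cons x xs ih =>
    simp only [List.foldl_cons, ih, PySem.Set.mem_inter, PySem.Set.mem_ofList,
      List.mem_cons]
    constructor
    · rintro ⟨⟨h1, h2⟩, h3⟩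
      exact ⟨h1, fun l hl => hl.elim (fun e => e ▸ h2) (h3 l)⟩
    · rintro ⟨h1, h2⟩
      exact ⟨⟨h1, h2 x (Or.inl rfl)⟩, fun l hl => h2 l (Or.inr hl)⟩

lemma one_word_match_eq (labels : List String) :
    one_word_match labels = one_word_match_alt labels := by
  rw [Bool.eq_iff_iff]
  cases labels with
  | nil => simp [one_word_match, one_word_match_alt]
  | cons l0 rest =>
    simp only [one_word_match, one_word_match_alt, List.all_eq_true, List.any_eq_true,
      List.mem_filter, bne_iff_ne, List.contains_iff_mem, Bool.not_eq_eq_eq_not,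
      Bool.not_true, List.isEmpty_eq_false_iff_exists_mem, ne_eq]
    constructor
    · intro hA
      obtain ⟨w, hw, hall⟩ := hA l0 (List.mem_cons_self ..)
      refine ⟨w, (mem_foldl_inter ..).mpr ⟨PySem.Set.mem_ofList .. |>.mpr hw, ?_⟩⟩
      intro l hl
      by_cases he : l = l0
      · exact he ▸ hw
      · exact hall l ⟨List.mem_cons_of_mem _ hl, by simpa using he⟩
    · rintro ⟨w, hw⟩
      obtain ⟨hw0, hrest⟩ := (mem_foldl_inter ..).mp hw
      rw [PySem.Set.mem_ofList] at hw0
      intro label hlabel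
      refine ⟨w, ?_, fun l hl => ?_⟩
      · rcases List.mem_cons.mp hlabel with e | h
        · exact e ▸ hw0
        · exact hrest _ h
      · rcases List.mem_cons.mp hl.1 with e | h
        · exact e ▸ hw0
        · exact hrest _ h

-- ===== VERDICT (by name: the statement is the Claim_ definition above) =====
theorem one_word_match_spec : Claim_equal_one_word_match := by
  intro labels _
  exact one_word_match_eq labels
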